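-- pv_equiv track=rewrite | github.com/dywzju09-blip/cpg_generator_export | tools/verification/path_solver.py | _contains_top_level
-- ===== SOURCE A (Python) =====
-- def _contains_top_level(expr: str, token: str) -> bool:
--     depth = 0
--     idx = 0
--     while idx <= len(expr) - len(token):
--         ch = expr[idx]
--         if ch in "([{":
--             depth += 1
--             idx += 1
--             continue
--         if ch in ")]}":
--             depth = max(0, depth - 1)
--             idx += 1
--             continue
--         if depth == 0 and expr[idx : idx + len(token)] == token:
--             return True
--         idx += 1
--     return False
-- ===== SOURCE B (Python) =====
-- def _contains_top_level(expr: str, token: str) -> bool: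
--     m = len(token)
--     # Pass 1: bracket depth just before each index, clamped at 0.
--     depth_before = []
--     d = 0
--     for ch in expr:
--         depth_before.append(d)
--         if ch in "([{":
--             d += 1
--         elif ch in ")]}":
--             d = max(0, d - 1)
--     # Pass 2: try each start position; brackets are never match starts.
--     for idx in range(len(expr) - m + 1):
--         ch = expr[idx]
--         if ch in "([{" or ch in ")]}":
--             continue
--         if depth_before[idx] == 0 and expr[idx:idx + m] == token:
--             return True
--     return False
-- ===== Notes on version B (the rewrite author's own statement) =====
-- stated objective: alternative
-- what changed: A fuses depth tracking and matching in one stateful while-loop; B first builds a depth_before table in one pass, then scans candidate start positions with a stateless for-loop over that table.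
-- outside the precondition, e.g. on _contains_top_level('a', ''): A returns True, B returns True
import Mathlib
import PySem

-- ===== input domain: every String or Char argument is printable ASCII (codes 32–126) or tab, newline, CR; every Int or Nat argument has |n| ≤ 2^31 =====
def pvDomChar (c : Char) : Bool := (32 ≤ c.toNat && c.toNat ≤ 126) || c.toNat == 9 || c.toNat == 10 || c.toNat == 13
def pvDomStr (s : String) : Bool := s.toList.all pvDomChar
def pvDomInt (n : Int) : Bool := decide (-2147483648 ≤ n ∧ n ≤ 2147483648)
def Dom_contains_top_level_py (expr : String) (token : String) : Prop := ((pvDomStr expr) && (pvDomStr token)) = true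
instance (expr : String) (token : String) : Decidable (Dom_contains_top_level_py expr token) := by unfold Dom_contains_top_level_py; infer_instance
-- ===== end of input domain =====

-- B replaces A's fused stateful while-loop by two passes (a depth_before table, then a
-- stateless scan of start positions); equivalence of return values proved for token ≠ "".

-- ===== PORT A =====

def ctlOpen (ch : Char) : Bool := ch = '(' ∨ ch = '[' ∨ ch = '{'    -- ch in "([{"
def ctlClose (ch : Char) : Bool := ch = ')' ∨ ch = ']' ∨ ch = '}'   -- ch in ")]}"

-- A's while-loop; idx only grows, so the loop is recursion on a fuel counter gas,
-- started at len(expr)+1 so it never runs out before the loop condition fails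
-- (gas = 0 forces idx > len(expr), where the condition is false anyway).
-- es[idx]? = none is Python's IndexError (reachable only for token = "", excluded by
-- Pre_).  Nat subtraction depth - 1 is exactly max(0, depth - 1).  expr[idx : idx+m]
-- with 0 ≤ idx is exactly (es.drop idx).take m.
def ctlA_go (es ts : List Char) (depth idx : Nat) : Nat → Bool
  | 0 => false
  | gas + 1 =>
    if (idx : Int) ≤ (es.length : Int) - (ts.length : Int) then
      match es[idx]? with
      | none => false            -- Python raises IndexError here
      | some ch =>
        if ctlOpen ch then ctlA_go es ts (depth + 1) (idx + 1) gas
        else if ctlClose ch then ctlA_go es ts (depth - 1) (idx + 1) gas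
        else if depth = 0 ∧ (es.drop idx).take ts.length = ts then true
        else ctlA_go es ts depth (idx + 1) gas
    else false

def contains_top_level_py (expr : String) (token : String) : Bool :=
  ctlA_go expr.toList token.toList 0 0 (expr.toList.length + 1)

-- ===== PORT B =====

-- Pass 1: depth just before each index (clamped at 0), as a list.
def ctlB_depths (d : Nat) : List Char → List Nat := fun l =>
  match l with
  | [] => []
  | ch :: rest =>
      d :: ctlB_depths (if ctlOpen ch then d + 1 else if ctlClose ch then d - 1 else d) rest

-- Pass 2: for idx in range(len(expr) - m + 1); gas counts the remaining range
-- elements (Nat subtraction gives exactly max(0, len(expr) - m + 1) of them).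
-- depth_before[idx] is in range whenever es[idx]? is some (same length), so getD 0 is
-- exact there.
def ctlB_go (es ts : List Char) (depths : List Nat) (idx : Nat) : Nat → Bool
  | 0 => false
  | gas + 1 =>
    match es[idx]? with
    | none => false              -- Python raises IndexError here
    | some ch =>
      if ctlOpen ch ∨ ctlClose ch then ctlB_go es ts depths (idx + 1) gas
      else if depths.getD idx 0 = 0 ∧ (es.drop idx).take ts.length = ts then true
      else ctlB_go es ts depths (idx + 1) gas

def contains_top_level_py_alt (expr : String) (token : String) : Bool :=
  let es := expr.toList
  ctlB_go es token.toList (ctlB_depths 0 es) 0 (es.length + 1 - token.toList.length)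

-- ===== PRECONDITION & SPEC =====
-- Pre_ excludes the empty token: there A raises IndexError whenever expr has no
-- top-level non-bracket character, and otherwise returns a degenerate trivial match.
def Pre_contains_top_level_py (expr : String) (token : String) : Prop := token ≠ ""
instance (expr : String) (token : String) : Decidable (Pre_contains_top_level_py expr token) := by
  unfold Pre_contains_top_level_py; infer_instance

def pvWitness_contains_top_level_py : String × String := ("a+(b*c)", "b")

def Spec_contains_top_level_py (expr : String) (token : String) (out : Bool) : Prop := out = contains_top_level_py_alt expr token
instance (expr : String) (token : String) (out : Bool) : Decidable (Spec_contains_top_level_py expr token out) := by unfold Spec_contains_top_level_py; infer_instance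

-- ===== CLAIM (what is proved, stated in full; the proofs are below) =====
def Claim_equal_contains_top_level_py : Prop := ∀ (expr : String) (token : String), Dom_contains_top_level_py expr token → Pre_contains_top_level_py expr token → Spec_contains_top_level_py expr token (contains_top_level_py expr token)

-- ===== LEMMAS AND PROOFS =====

-- the single-step depth update
def ctlStep (d : Nat) (ch : Char) : Nat :=
  if ctlOpen ch then d + 1 else if ctlClose ch then d - 1 else d

lemma ctl_foldl_take_succ (es : List Char) (d idx : Nat) (hlt : idx < es.length) :
    (es.take (idx + 1)).foldl ctlStep d = ctlStep ((es.take idx).foldl ctlStep d) es[idx] := by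
  rw [List.take_add_one, List.getElem?_eq_getElem hlt, Option.toList_some, List.foldl_append,
    List.foldl_cons, List.foldl_nil]

lemma ctlB_depths_get : ∀ (es : List Char) (d idx : Nat), idx < es.length →
    (ctlB_depths d es)[idx]? = some ((es.take idx).foldl ctlStep d) := by
  intro es
  induction es with
  | nil => intro d idx h; simp at h
  | cons ch rest ih =>
    intro d idx h
    cases idx with
    | zero => simp [ctlB_depths]
    | succ k =>
      simp only [ctlB_depths, List.getElem?_cons_succ, List.take_succ_cons, List.foldl_cons]
      exact ih _ k (by simpa using h)

lemma ctl_main (es ts : List Char) (hts : ts ≠ []) :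
    ∀ gA idx depth, gA = es.length + 1 - idx →
      depth = (es.take idx).foldl ctlStep 0 →
      ctlA_go es ts depth idx gA
        = ctlB_go es ts (ctlB_depths 0 es) idx (es.length + 1 - ts.length - idx) := by
  have hm : 1 ≤ ts.length := by cases ts with | nil => exact absurd rfl hts | cons a l => simp
  intro gA
  induction gA with
  | zero =>
    intro idx depth hga hdep
    have h0 : es.length + 1 - ts.length - idx = 0 := by omega
    rw [h0, ctlA_go, ctlB_go]
  | succ g ih =>
    intro idx depth hga hdep
    rw [ctlA_go]
    by_cases hb : (idx : Int) ≤ (es.length : Int) - (ts.length : Int)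
    · rw [if_pos hb]
      have hlt : idx < es.length := by omega
      have hgB : es.length + 1 - ts.length - idx
          = (es.length + 1 - ts.length - (idx + 1)) + 1 := by omega
      rw [hgB, ctlB_go]
      have hget : es[idx]? = some es[idx] := List.getElem?_eq_getElem hlt
      rw [hget]
      have hstep := ctl_foldl_take_succ es 0 idx hlt
      rw [← hdep] at hstep
      have hga' : g = es.length + 1 - (idx + 1) := by omega
      by_cases ho : ctlOpen es[idx] = true
      · simp only [ho, if_true, true_or]
        exact ih (idx + 1) (depth + 1) hga' (by rw [hstep]; simp [ctlStep, ho])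
      · by_cases hc : ctlClose es[idx] = true
        · simp only [ho, hc, if_true, if_false, Bool.false_eq_true, or_true]
          exact ih (idx + 1) (depth - 1) hga' (by rw [hstep]; simp [ctlStep, ho, hc])
        · simp only [ho, hc, if_false, Bool.false_eq_true, or_self, List.getD,
            ctlB_depths_get es 0 idx hlt, ← hdep, Option.getD_some]
          by_cases hmatch : depth = 0 ∧ (es.drop idx).take ts.length = ts
          · rw [if_pos hmatch, if_pos hmatch]
          · rw [if_neg hmatch, if_neg hmatch]
            exact ih (idx + 1) depth hga' (by rw [hstep]; simp [ctlStep, ho, hc])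
    · rw [if_neg hb]
      have h0 : es.length + 1 - ts.length - idx = 0 := by omega
      rw [h0, ctlB_go]

-- ===== VERDICT (by name: the statement is the Claim_ definition above) =====
theorem contains_top_level_py_spec : Claim_equal_contains_top_level_py := by
  intro expr token _ hpre
  unfold Spec_contains_top_level_py contains_top_level_py contains_top_level_py_alt
  have hts : token.toList ≠ [] := by
    intro h
    rw [String.toList_eq_nil_iff] at h
    exact hpre h
  have := ctl_main expr.toList token.toList hts (expr.toList.length + 1) 0 0 (by omega) (by simp)
  simpa using this
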